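-- pv_equiv track=rewrite | github.com/BarraHarrison/Algorithms-Data-Structures | bigO_notation.py | nlogn_time
-- ===== SOURCE A (Python) =====
-- def nlogn_time(n):
--     # O(n log n) - Common in sorting algorithms like Merge Sort
--     count = 0
--     for i in range(n):
--         j = 1
--         while j < n:
--             j *= 2
--             count += 1
--     return count
-- ===== SOURCE B (Python) =====
-- def nlogn_time(n):
--     # closed form: each outer iteration counts ceil(log2(n)) = (n-1).bit_length() doublings
--     if n <= 0:
--         return 0
--     return n * (n - 1).bit_length()
-- ===== Notes on version B (the rewrite author's own statement) =====
-- stated objective: faster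
-- what changed: Replaced the nested doubling loops by the closed form n * (n-1).bit_length(), since the inner while loop always runs ceil(log2 n) times independently of i.
import Mathlib
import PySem

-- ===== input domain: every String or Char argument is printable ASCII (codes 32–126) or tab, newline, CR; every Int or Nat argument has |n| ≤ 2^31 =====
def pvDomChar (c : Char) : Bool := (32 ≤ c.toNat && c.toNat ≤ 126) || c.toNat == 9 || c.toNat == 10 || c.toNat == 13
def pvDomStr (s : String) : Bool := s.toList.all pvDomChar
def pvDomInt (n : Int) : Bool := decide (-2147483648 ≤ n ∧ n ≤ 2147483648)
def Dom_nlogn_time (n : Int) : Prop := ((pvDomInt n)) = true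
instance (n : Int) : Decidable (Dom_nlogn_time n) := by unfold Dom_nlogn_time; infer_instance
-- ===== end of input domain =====

-- B replaces A's nested doubling loops by the closed form n * (n-1).bit_length() (faster).

-- ===== PORT A =====
-- the inner 'while j < n: j *= 2; count += 1' loop, as the count it adds;
-- the '1 ≤ j' conjunct is a totality guard only (A always enters with j = 1)
def pvWhileA (n j : Int) : Int :=
  if h : j < n ∧ 1 ≤ j then pvWhileA n (2 * j) + 1 else 0
termination_by (n - j).toNat
decreasing_by
  omega

def nlogn_time (n : Int) : Int :=
  (PySem.List.pyRange 0 n 1).foldl (fun count _ => count + pvWhileA n 1) 0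

-- ===== PORT B =====
-- port of Python's m.bit_length() for m : Nat (Source B calls it on n-1 ≥ 0)
def pvBitLen (m : Nat) : Nat := if m = 0 then 0 else Nat.log 2 m + 1

def nlogn_time_alt (n : Int) : Int :=
  if n ≤ 0 then 0 else n * (pvBitLen (n - 1).toNat : Int)

-- ===== PRECONDITION & SPEC =====
def Spec_nlogn_time (n : Int) (out : Int) : Prop := out = nlogn_time_alt n
instance (n : Int) (out : Int) : Decidable (Spec_nlogn_time n out) := by unfold Spec_nlogn_time; infer_instance

-- ===== CLAIM (what is proved, stated in full; the proofs are below) =====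
def Claim_equal_nlogn_time : Prop := ∀ (n : Int), Dom_nlogn_time n → Spec_nlogn_time n (nlogn_time n)

-- ===== LEMMAS AND PROOFS =====

-- folding a constant add over a list adds length · k
theorem pv_foldl_const_add (l : List Int) (c k : Int) :
    l.foldl (fun count _ => count + k) c = c + l.length * k := by
  induction l generalizing c with
  | nil => simp
  | cons x xs ih => simp [List.foldl, ih]; ring

-- pvWhileA returns k when j·2^k is the first doubling reaching n
theorem pvWhileA_eq (k : Nat) (n j : Int) (hj : 1 ≤ j)
    (hub : n ≤ 2 ^ k * j) (hlb : k = 0 ∨ 2 ^ (k - 1) * j < n) :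
    pvWhileA n j = k := by
  induction k generalizing j with
  | zero =>
    rw [pvWhileA]
    have : ¬ (j < n ∧ 1 ≤ j) := by
      simp at hub; omega
    simp [this]
  | succ k ih =>
    have hlb' : 2 ^ k * j < n := by
      rcases hlb with h | h
      · omega
      · simpa using h
    have hjn : j < n := by
      have h1 : (1 : Int) ≤ 2 ^ k := one_le_pow₀ (by norm_num)
      nlinarith
    rw [pvWhileA]
    simp only [hjn, hj, and_self, dite_true]
    have := ih (2 * j) (by omega)
      (by rw [pow_succ] at hub; linarith [hub])
      (by
        cases k with
        | zero => exact Or.inl rfl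
        | succ m =>
          right
          simp only [Nat.add_sub_cancel]
          have e : (2 : Int) ^ (m + 1) * j = 2 ^ m * (2 * j) := by
            rw [pow_succ]; ring
          rw [← e]; exact hlb')
    omega

-- for m ≥ 1 (Nat): 2^(bitLen m - 1) ≤ m < 2^(bitLen m); bitLen 0 = 0
theorem pvBitLen_lt (m : Nat) : m < 2 ^ pvBitLen m := by
  unfold pvBitLen
  split_ifs with h
  · omega
  · exact Nat.lt_pow_succ_log_self (by norm_num) m

theorem pvBitLen_le (m : Nat) (h : m ≠ 0) : 2 ^ (pvBitLen m - 1) ≤ m := by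
  unfold pvBitLen
  simp [h]
  exact Nat.pow_log_le_self 2 h

theorem pvWhileA_one (n : Int) (hn : 1 ≤ n) :
    pvWhileA n 1 = (pvBitLen (n - 1).toNat : Int) := by
  set m : Nat := (n - 1).toNat with hm
  have hnm : n = (m : Int) + 1 := by omega
  apply pvWhileA_eq (pvBitLen m) n 1 le_rfl
  · have := pvBitLen_lt m
    have h2 : ((m : Int)) < ((2 ^ pvBitLen m : Nat) : Int) := by exact_mod_cast this
    push_cast at h2 ⊢
    omega
  · by_cases h : m = 0
    · left; simp [pvBitLen, h]
    · right
      have := pvBitLen_le m h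
      have h2 : ((2 ^ (pvBitLen m - 1) : Nat) : Int) ≤ (m : Int) := by exact_mod_cast this
      push_cast at h2 ⊢
      omega

-- ===== VERDICT (by name: the statement is the Claim_ definition above) =====
theorem nlogn_time_spec : Claim_equal_nlogn_time := by
  intro n _
  unfold Spec_nlogn_time nlogn_time nlogn_time_alt
  by_cases hn : n ≤ 0
  · rw [PySem.List.pyRange_one_eq_nil (by omega)]
    simp [hn]
  · push Not at hn
    rw [pv_foldl_const_add, PySem.List.length_pyRange_one,
        pvWhileA_one n (by omega)]
    rw [if_neg (by omega : ¬ n ≤ 0)]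
    have e : ((n - 0).toNat : Int) = n := by omega
    rw [e]; ring
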